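-- pv_equiv track=rewrite | github.com/vidyabhandary/projecteuler | src/problem5.py | count_all_factors
-- ===== SOURCE A (Python) =====
-- def is_prime(number):
--
--     if number < 2:
--         return False
--
--     for i in range(2, number + 1):
--         # Can use the math.sqrt function
--         if i * i > number:
--             break
--
--         if number % i == 0:
--             return False
--
--     return True
--
-- def get_factors(number):
--     factors = []
--     mod_number = number
--
--     if number == 0 or number == 1:
--         return [number]
--
--     i = 2
--     # Use the reducing method to get the prime factors
--     while not(mod_number in (0, 1) or i >= number):
--
--         if is_prime(i):
--             if mod_number % i == 0:
--                 factors.append(i)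
--                 mod_number = mod_number // i
--                 i = 2
--             else:
--                 i += 1
--         else:
--             i += 1
--
--     if not factors:
--         factors.append(number)
--
--     return factors
--
-- def count_primes(factors):
--     prime_count = {}
--     for i in factors:
--         prime_count[i] = factors.count(i)
--
--     return prime_count
--
-- def count_all_factors(num_limit):
--
--     all_factors = []
--     max_of_factors = {}
--
--     # Get prime factors for all numbers, count multiples of each prime factor
--     # for a number and finally get the aggregate count for each prime factor
--     # for all numbers till num_limit
--     for i in range(2, num_limit + 1):
--
--         # Get all prime factors of i
--         factors = get_factors(i)
--
--         all_factors += factors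
--
--         # Get count of the multiples for each prime factor
--         count_for_prime = count_primes(factors)
--
--         # If max count for a prime factor is less than the stored max count for
--         # the same prime number update the number to reflect the new maximum
--         # count - else store the number
--         # In essence this count will lead to being able to determine LCM
--         for key, value in count_for_prime.items():
--             if max_of_factors.get(key):
--                 if max_of_factors.get(key) < value:
--                     max_of_factors[key] = value
--             else:
--                 max_of_factors[key] = value
--
--     return all_factors, max_of_factors
-- ===== SOURCE B (Python) =====
-- def count_all_factors(num_limit):
--
--     all_factors = []
--     max_of_factors = {}
--
--     # Factor each number by one forward pass of trial division (d*d <= x),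
--     # counting each prime's exponent inline and folding it into the running max.
--     for i in range(2, num_limit + 1):
--         x = i
--         d = 2
--         while d * d <= x:
--             if x % d == 0:
--                 c = 0
--                 while x % d == 0:
--                     x //= d
--                     c += 1
--                     all_factors.append(d)
--                 if max_of_factors.get(d, 0) < c:
--                     max_of_factors[d] = c
--             else:
--                 d += 1
--         if x > 1:
--             all_factors.append(x)
--             if max_of_factors.get(x, 0) < 1:
--                 max_of_factors[x] = 1
--
--     return all_factors, max_of_factors
-- ===== Notes on version B (the rewrite author's own statement) =====
-- stated objective: faster
-- what changed: A factors each number by restarting its divisor scan from the smallest candidate after every hit, running a trial-division primality test on each candidate, and builds a per-number dict with list.count before merging maxima; B factors each number in a single forward trial-division pass (stopping once the divisor squared exceeds the remainder), counting each prime's exponent inline and folding it straight into the running max dict.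
import Mathlib
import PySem

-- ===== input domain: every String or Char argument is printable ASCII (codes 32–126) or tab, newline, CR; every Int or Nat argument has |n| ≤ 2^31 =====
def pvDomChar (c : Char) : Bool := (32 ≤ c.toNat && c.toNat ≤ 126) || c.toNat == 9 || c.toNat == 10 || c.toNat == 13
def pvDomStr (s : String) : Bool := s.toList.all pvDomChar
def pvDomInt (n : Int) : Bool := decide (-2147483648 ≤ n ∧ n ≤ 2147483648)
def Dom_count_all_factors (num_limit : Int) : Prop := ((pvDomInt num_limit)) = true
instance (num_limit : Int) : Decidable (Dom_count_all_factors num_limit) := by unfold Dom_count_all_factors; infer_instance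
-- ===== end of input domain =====

-- B replaces A's restart-from-2 factor search (with a trial-division primality test per
-- candidate and a per-number dict built by list.count) by a single forward trial-division
-- pass per number that counts each prime's exponent inline; measured faster.

-- ===== PORT A =====

-- termination helper for the exact-division steps of both ports
theorem pvDivShrink {mo i : Int} (hi : 2 ≤ i) (hmo : mo ≠ 0) (hdvd : i ∣ mo) :
    (PySem.Int.floordiv mo i).natAbs < mo.natAbs := by
  rw [PySem.Int.floordiv_eq_ediv_of_pos (by omega)]
  rcases hdvd with ⟨q, rfl⟩
  rw [Int.mul_ediv_cancel_left _ (by omega)]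
  have hq : q ≠ 0 := by rintro rfl; simp at hmo
  have h1 : 1 ≤ q.natAbs := by omega
  calc q.natAbs < 2 * q.natAbs := by omega
    _ ≤ i.natAbs * q.natAbs := Nat.mul_le_mul_right _ (by omega)
    _ = (i * q).natAbs := (Int.natAbs_mul i q).symm

-- for i in range(2, number + 1): if i*i > number: break; if number % i == 0: return False
def isPrimeLoop (number i : Int) : Bool :=
  if i < number + 1 then
    if i * i > number then true
    else if PySem.Int.mod number i = 0 then false
    else isPrimeLoop number (i + 1)
  else true
termination_by (number + 1 - i).toNat
decreasing_by omega

def is_prime (number : Int) : Bool :=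
  if number < 2 then false
  else isPrimeLoop number 2

theorem is_prime_two_le {i : Int} (h : is_prime i = true) : 2 ≤ i := by
  unfold is_prime at h; by_contra hc; simp [show i < 2 by omega] at h

-- the while loop of get_factors
def gfLoop (number mo i : Int) (factors : List Int) : List Int :=
  if mo = 0 ∨ mo = 1 ∨ i ≥ number then factors
  else if is_prime i then
    if PySem.Int.mod mo i = 0 then
      gfLoop number (PySem.Int.floordiv mo i) 2 (factors ++ [i])
    else gfLoop number mo (i + 1) factors
  else gfLoop number mo (i + 1) factors
termination_by (mo.natAbs, (number - i).toNat)
decreasing_by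
  · exact Prod.Lex.left _ _ (pvDivShrink (is_prime_two_le (by assumption)) (by tauto)
      ((PySem.Int.mod_eq_zero_iff_dvd _ _).mp (by assumption)))
  · exact Prod.Lex.right _ (by omega)
  · exact Prod.Lex.right _ (by omega)

def get_factors (number : Int) : List Int :=
  if number = 0 ∨ number = 1 then [number]
  else
    let factors := gfLoop number number 2 []
    if factors = [] then [number] else factors

def count_primes (factors : List Int) : PySem.Dict Int Int :=
  factors.foldl (fun d p => d.insert p (factors.count p : Int)) PySem.Dict.empty

-- the max-update branch of A's inner items loop (Python truthiness of .get(key))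
def mergeStepA (d : PySem.Dict Int Int) (kv : Int × Int) : PySem.Dict Int Int :=
  match d.get? kv.1 with
  | some v => if v ≠ 0 then (if v < kv.2 then d.insert kv.1 kv.2 else d) else d.insert kv.1 kv.2
  | none => d.insert kv.1 kv.2

def count_all_factors (num_limit : Int) : List Int × (List (Int × Int)) :=
  let st := (PySem.List.pyRange 2 (num_limit + 1) 1).foldl
    (fun (st : List Int × PySem.Dict Int Int) i =>
      let factors := get_factors i
      let all_factors := st.1 ++ factors
      let count_for_prime := count_primes factors
      (all_factors, count_for_prime.items.foldl mergeStepA st.2))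
    ([], PySem.Dict.empty)
  (st.1, st.2.items)

-- ===== PORT B =====

-- inner while of Source B: while x % d == 0: x //= d; c += 1; all_factors.append(d)
-- ('2 ≤ d ∧ x ≠ 0' is a totality guard: every call has d ≥ 2 and x ≥ 1, where it
--  is implied by 'x % d == 0' never driving x to 0; the loop test itself is x % d == 0)
def bStrip (x d c : Int) (all : List Int) : Int × Int × List Int :=
  if 2 ≤ d ∧ x ≠ 0 ∧ PySem.Int.mod x d = 0 then
    bStrip (PySem.Int.floordiv x d) d (c + 1) (all ++ [d])
  else (x, c, all)
termination_by x.natAbs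
decreasing_by exact pvDivShrink (by tauto) (by tauto) ((PySem.Int.mod_eq_zero_iff_dvd x d).mp (by tauto))

theorem bStrip_fst_natAbs_le (d : Int) : ∀ (x c : Int) (all : List Int),
    (bStrip x d c all).1.natAbs ≤ x.natAbs := by
  intro x c all
  induction x, c, all using bStrip.induct d with
  | case1 x c all h ih =>
    unfold bStrip; rw [if_pos h]
    exact ih.trans (Nat.le_of_lt (pvDivShrink h.1 h.2.1
      ((PySem.Int.mod_eq_zero_iff_dvd _ _).mp h.2.2)))
  | case2 x c all h => unfold bStrip; rw [if_neg h]

-- outer while of Source B's per-number loop: while d * d <= x: …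
-- ('2 ≤ d' is a totality guard: d starts at 2 and only ever increases)
def bFactorLoop (x d : Int) (all : List Int) (maxd : PySem.Dict Int Int) :
    List Int × PySem.Dict Int Int :=
  if hc : 2 ≤ d ∧ d * d ≤ x then
    if hm : PySem.Int.mod x d = 0 then
      let r := bStrip x d 0 all
      let maxd' := if maxd.getD d 0 < r.2.1 then maxd.insert d r.2.1 else maxd
      bFactorLoop r.1 d r.2.2 maxd'
    else bFactorLoop x (d + 1) all maxd
  else
    if 1 < x then
      (all ++ [x], if maxd.getD x 0 < 1 then maxd.insert x 1 else maxd)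
    else (all, maxd)
termination_by (x.natAbs, (x + 2 - d).toNat)
decreasing_by
  · refine Prod.Lex.left _ _ ?_
    have hx : x ≠ 0 := by rintro rfl; nlinarith [hc.1, hc.2]
    have h1 : (bStrip (PySem.Int.floordiv x d) d (0 + 1) (all ++ [d])).1.natAbs <
        x.natAbs := by
      exact Nat.lt_of_le_of_lt (bStrip_fst_natAbs_le _ _ _ _)
        (pvDivShrink hc.1 hx ((PySem.Int.mod_eq_zero_iff_dvd _ _).mp hm))
    unfold bStrip; rw [if_pos ⟨hc.1, hx, hm⟩]; exact h1
  · refine Prod.Lex.right _ ?_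
    have : d ≤ d * d := by nlinarith
    omega

def count_all_factors_alt (num_limit : Int) : List Int × (List (Int × Int)) :=
  let st := (PySem.List.pyRange 2 (num_limit + 1) 1).foldl
    (fun (st : List Int × PySem.Dict Int Int) i => bFactorLoop i 2 st.1 st.2)
    ([], PySem.Dict.empty)
  (st.1, st.2.items)

-- ===== PRECONDITION & SPEC =====
def Spec_count_all_factors (num_limit : Int) (out : List Int × (List (Int × Int))) : Prop := out = count_all_factors_alt num_limit
instance (num_limit : Int) (out : List Int × (List (Int × Int))) : Decidable (Spec_count_all_factors num_limit out) := by unfold Spec_count_all_factors; infer_instance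

-- ===== CLAIM (what is proved, stated in full; the proofs are below) =====
def Claim_equal_count_all_factors : Prop := ∀ (num_limit : Int), Dom_count_all_factors num_limit → Spec_count_all_factors num_limit (count_all_factors num_limit)

-- ===== LEMMAS AND PROOFS =====

-- the ascending prime factorization of m, as a list of Ints (the common value of both ports)
def pfI (m : Nat) : List Int := (Nat.primeFactorsList m).map Int.ofNat

-- run-length encoding of a grouped list: the items of A's per-number count dict,
-- and the per-number (prime, exponent) updates B performs
def runsOf : List Int → List (Int × Int)
  | [] => []
  | p :: rest =>
      (p, 1 + ((rest.takeWhile (· == p)).length : Int)) :: runsOf (rest.dropWhile (· == p))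
termination_by l => l.length
decreasing_by simpa [Nat.lt_succ_iff] using List.length_dropWhile_le _ _

-- the common max-update step (= B's step; = A's step on values ≥ 1)
def mergeStep (d : PySem.Dict Int Int) (kv : Int × Int) : PySem.Dict Int Int :=
  if d.getD kv.1 0 < kv.2 then d.insert kv.1 kv.2 else d

theorem int_dvd_iff {k n : Int} (hk : 0 ≤ k) (hn : 0 ≤ n) : k ∣ n ↔ k.toNat ∣ n.toNat := by
  rw [← Int.natCast_dvd_natCast, Int.toNat_of_nonneg hk, Int.toNat_of_nonneg hn]

theorem natPrime_of_no_small {m : Nat} (hm : 2 ≤ m)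
    (h : ∀ k, 2 ≤ k → k * k ≤ m → ¬ k ∣ m) : m.Prime := by
  by_contra hc
  have h2 := Nat.minFac_sq_le_self (by omega) hc
  have hp := Nat.minFac_prime (by omega : m ≠ 1)
  exact h m.minFac hp.two_le (by nlinarith [h2]) (Nat.minFac_dvd m)

theorem minFac_eq_of {m d : Nat} (hd : 2 ≤ d) (hdvd : d ∣ m) (hm : 2 ≤ m)
    (hno : ∀ k, 2 ≤ k → k < d → ¬ k ∣ m) : m.minFac = d := by
  refine le_antisymm (Nat.minFac_le_of_dvd hd hdvd) ?_
  by_contra hc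
  exact hno m.minFac (Nat.minFac_prime (by omega : m ≠ 1)).two_le (by omega) (Nat.minFac_dvd m)

theorem pf_cons {m : Nat} (hm : 2 ≤ m) :
    Nat.primeFactorsList m = m.minFac :: Nat.primeFactorsList (m / m.minFac) := by
  obtain ⟨k, rfl⟩ : ∃ k, m = k + 2 := ⟨m - 2, by omega⟩
  exact Nat.primeFactorsList_add_two k

theorem isPrimeLoop_iff (number : Int) (hn : 2 ≤ number) : ∀ i : Int, 2 ≤ i → i ≤ number →
    (∀ k : Int, 2 ≤ k → k < i → ¬ k ∣ number) →
    (isPrimeLoop number i = true ↔ number.toNat.Prime) := by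
  intro i
  induction i using isPrimeLoop.induct number with
  | case1 i h1 h2 =>
    intro hi _ inv
    rw [isPrimeLoop, if_pos h1, if_pos h2]
    refine iff_of_true rfl (natPrime_of_no_small (by omega) ?_)
    intro k hk2 hkk hdvd
    have hkle : ((k : Int)) * (k : Int) ≤ number := by
      have : ((k * k : Nat) : Int) ≤ ((number.toNat : Nat) : Int) := by exact_mod_cast hkk
      push_cast at this
      omega
    have hki : (k : Int) < i := by nlinarith [hkle, h2]
    refine inv (k : Int) (by exact_mod_cast hk2) hki ?_
    rw [int_dvd_iff (by omega) (by omega)]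
    simpa using hdvd
  | case2 i h1 h2 h3 =>
    intro hi _ inv
    rw [isPrimeLoop, if_pos h1, if_neg h2, if_pos h3]
    refine iff_of_false (by simp) ?_
    intro hp
    have hdvd : i ∣ number := (PySem.Int.mod_eq_zero_iff_dvd _ _).mp h3
    have hii : i * i ≤ number := by omega
    have hlt : i < number := by nlinarith
    have hdn : i.toNat ∣ number.toNat := (int_dvd_iff (by omega) (by omega)).mp hdvd
    rcases hp.eq_one_or_self_of_dvd i.toNat hdn with h | h <;> omega
  | case3 i h1 h2 h3 ih =>
    intro hi hile inv
    rw [isPrimeLoop, if_pos h1, if_neg h2, if_neg h3]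
    have hii : i * i ≤ number := by omega
    have h2i : 2 * i ≤ i * i := by nlinarith
    refine ih (by omega) (by omega) ?_
    intro k hk2 hki
    rcases eq_or_lt_of_le (show k ≤ i by omega) with rfl | hlt
    · exact fun hd => h3 ((PySem.Int.mod_eq_zero_iff_dvd _ _).mpr hd)
    · exact inv k hk2 hlt
  | case4 i h1 =>
    intro hi hile inv
    exact absurd (show i < number + 1 by omega) h1

theorem isPrime_iff {n : Int} (hn : 2 ≤ n) : is_prime n = true ↔ n.toNat.Prime := by
  rw [is_prime, if_neg (by omega)]
  exact isPrimeLoop_iff n hn 2 le_rfl hn (by intro k hk hk2; omega)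

theorem pfI_sorted (m : Nat) : (pfI m).Pairwise (· ≤ ·) := by
  unfold pfI
  refine List.Pairwise.map _ ?_ (Nat.primeFactorsList_sorted m).pairwise
  intro a b h
  simpa using Int.ofNat_le.mpr h

theorem mem_pfI {m : Nat} {y : Int} (h : y ∈ pfI m) :
    2 ≤ y ∧ y.toNat.Prime ∧ y ∣ (m : Int) := by
  unfold pfI at h
  obtain ⟨p, hp, rfl⟩ := List.mem_map.mp h
  have h1 := Nat.prime_of_mem_primeFactorsList hp
  refine ⟨by simpa using Int.ofNat_le.mpr h1.two_le, by simpa using h1, ?_⟩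
  simpa using Int.natCast_dvd_natCast.mpr (Nat.dvd_of_mem_primeFactorsList hp)

-- ===== A side =====

theorem minFac_ge_int {mo i : Int} (hmo : 2 ≤ mo) (_i2 : 2 ≤ i)
    (inv : ∀ k : Int, 2 ≤ k → k < i → is_prime k = true → ¬ k ∣ mo) :
    i ≤ ((mo.toNat.minFac : Nat) : Int) := by
  by_contra hc
  rw [not_le] at hc
  have hqp : (mo.toNat.minFac).Prime := Nat.minFac_prime (by omega : mo.toNat ≠ 1)
  have h2q : 2 ≤ ((mo.toNat.minFac : Nat) : Int) := by exact_mod_cast hqp.two_le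
  have hdvd : ((mo.toNat.minFac : Nat) : Int) ∣ mo := by
    rw [int_dvd_iff (by omega) (by omega)]
    simpa using Nat.minFac_dvd mo.toNat
  exact inv _ h2q hc ((isPrime_iff h2q).mpr (by simpa using hqp)) hdvd

theorem minFac_eq_int {mo i : Int} (hmo : 2 ≤ mo) (hi : 2 ≤ i) (hdvd : i ∣ mo)
    (inv : ∀ k : Int, 2 ≤ k → k < i → is_prime k = true → ¬ k ∣ mo) :
    mo.toNat.minFac = i.toNat := by
  have hle : mo.toNat.minFac ≤ i.toNat :=
    Nat.minFac_le_of_dvd (by omega) ((int_dvd_iff (by omega) (by omega)).mp hdvd)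
  have hge := minFac_ge_int hmo hi inv
  omega

theorem gf_spec (number : Int) (hn : 2 ≤ number) : ∀ (mo i : Int) (factors : List Int),
    2 ≤ i → 1 ≤ mo → mo ≤ number →
    (factors = [] ∧ mo = number ∨ mo * 2 ≤ number) →
    (∀ k : Int, 2 ≤ k → k < i → is_prime k = true → ¬ k ∣ mo) →
    gfLoop number mo i factors = factors ++ pfI mo.toNat ∨
      (factors = [] ∧ gfLoop number mo i factors = [] ∧ mo = number ∧ number.toNat.Prime) := by
  intro mo i factors
  induction mo, i, factors using gfLoop.induct number with
  | case1 mo i factors h =>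
    intro hi hmo1 hmole hdisj inv
    rw [gfLoop, if_pos h]
    by_cases hmo : mo = 1
    · subst hmo; left; simp [pfI]
    · have hilen : i ≥ number := by
        rcases h with h | h | h
        · omega
        · omega
        · exact h
      have hmo2 : 2 ≤ mo := by omega
      have hq := minFac_ge_int hmo2 hi inv
      have hqle : mo.toNat.minFac ≤ mo.toNat := Nat.minFac_le (by omega)
      have hmoeq : mo = number := by omega
      have hprime : number.toNat.Prime := by
        have h1 : mo.toNat.minFac = mo.toNat := by omega
        have h2 : mo.toNat.Prime := by
          rw [Nat.prime_def_minFac]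
          omega
        rwa [hmoeq] at h2
      rcases hdisj with ⟨hf, _⟩ | hlt
      · exact Or.inr ⟨hf, hf, hmoeq, hprime⟩
      · omega
  | case2 mo i factors h hip hmod ih =>
    intro hi hmo1 hmole hdisj inv
    rw [gfLoop, if_neg h, if_pos hip, if_pos hmod]
    have hmo2 : 2 ≤ mo := by
      rcases (not_or.mp h) with ⟨h0, h12⟩
      rcases (not_or.mp h12) with ⟨h1, _⟩
      omega
    have hdvd : i ∣ mo := (PySem.Int.mod_eq_zero_iff_dvd _ _).mp hmod
    have hq : mo.toNat.minFac = i.toNat := minFac_eq_int hmo2 hi hdvd inv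
    obtain ⟨w, hw⟩ := hdvd
    have hw1 : 1 ≤ w := by nlinarith [hw]
    have hwle : w * 2 ≤ mo := by nlinarith [hw]
    have hfd : PySem.Int.floordiv mo i = w := by
      rw [PySem.Int.floordiv_eq_ediv_of_pos (by omega), hw,
        Int.mul_ediv_cancel_left _ (by omega)]
    rw [hfd] at ih ⊢
    have hih := ih le_rfl (by omega) (by omega) (Or.inr (by omega))
      (fun k hk2 hk1 _ => by omega)
    have hdivNat : mo.toNat / i.toNat = w.toNat := by
      have hmn : mo.toNat = i.toNat * w.toNat := by
        have h2 : ((i.toNat * w.toNat : Nat) : Int) = mo := by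
          push_cast
          rw [Int.toNat_of_nonneg (by omega : (0:Int) ≤ i),
              Int.toNat_of_nonneg (by omega : (0:Int) ≤ w)]
          omega
        omega
      rw [hmn, Nat.mul_div_cancel_left _ (by omega)]
    have hpf : pfI mo.toNat = i :: pfI w.toNat := by
      unfold pfI
      rw [pf_cons (by omega : 2 ≤ mo.toNat), hq, hdivNat, List.map_cons]
      congr 1
      simp
      omega
    rcases hih with hL | hR
    · left
      rw [hL, hpf, List.append_assoc, List.singleton_append]
    · simp at hR
  | case3 mo i factors h hip hmod ih =>
    intro hi hmo1 hmole hdisj inv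
    rw [gfLoop, if_neg h, if_pos hip, if_neg hmod]
    refine ih (by omega) hmo1 hmole hdisj ?_
    intro k hk2 hki hkp
    rcases eq_or_lt_of_le (show k ≤ i by omega) with rfl | hlt
    · exact fun hd => hmod ((PySem.Int.mod_eq_zero_iff_dvd _ _).mpr hd)
    · exact inv k hk2 hlt hkp
  | case4 mo i factors h hip ih =>
    intro hi hmo1 hmole hdisj inv
    rw [gfLoop, if_neg h, if_neg hip]
    refine ih (by omega) hmo1 hmole hdisj ?_
    intro k hk2 hki hkp
    rcases eq_or_lt_of_le (show k ≤ i by omega) with rfl | hlt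
    · exact absurd hkp hip
    · exact inv k hk2 hlt hkp

theorem get_factors_eq {n : Int} (hn : 2 ≤ n) : get_factors n = pfI n.toNat := by
  rw [get_factors, if_neg (by omega)]
  simp only []
  have h := gf_spec n hn n 2 [] le_rfl (by omega) le_rfl (Or.inl ⟨rfl, rfl⟩)
    (fun k hk hk2 _ => by omega)
  rcases h with h | h
  · rw [h]
    simp only [List.nil_append]
    rw [if_neg ?_]
    simp only [pfI, List.map_eq_nil_iff, Nat.primeFactorsList_eq_nil]
    omega
  · rcases h with ⟨_, hres, _, hprime⟩
    rw [hres, if_pos rfl]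
    simp [pfI, Nat.primeFactorsList_prime hprime]
    omega

-- ===== runs =====

theorem takeWhile_dropWhile_replicate (p : Int) : ∀ (e : Nat) (t : List Int),
    (∀ y ∈ t, y ≠ p) →
    (List.replicate e p ++ t).takeWhile (· == p) = List.replicate e p ∧
      (List.replicate e p ++ t).dropWhile (· == p) = t := by
  intro e
  induction e with
  | zero =>
    intro t ht
    cases t with
    | nil => simp
    | cons y t' =>
      have hb : (y == p) = false := beq_eq_false_iff_ne.mpr (ht y (by simp))
      simp [hb]
  | succ e ih =>
    intro t ht
    have h := ih t ht
    simp [List.replicate_succ, h.1, h.2]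

theorem runsOf_replicate_append (p : Int) (e : Nat) (he : 1 ≤ e) (t : List Int)
    (ht : ∀ y ∈ t, y ≠ p) :
    runsOf (List.replicate e p ++ t) = (p, (e : Int)) :: runsOf t := by
  obtain ⟨e', rfl⟩ : ∃ e', e = e' + 1 := ⟨e - 1, by omega⟩
  have h := takeWhile_dropWhile_replicate p e' t ht
  rw [List.replicate_succ, List.cons_append, runsOf, h.1, h.2]
  have hc : 1 + ((List.replicate e' p).length : Int) = ((e' + 1 : Nat) : Int) := by
    simp [List.length_replicate]; omega
  rw [hc]

theorem runsOf_pos : ∀ (l : List Int), ∀ kv ∈ runsOf l, 1 ≤ kv.2 := by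
  intro l
  induction l using runsOf.induct with
  | case1 => simp [runsOf]
  | case2 p rest ih =>
    intro kv hkv
    rw [runsOf] at hkv
    rcases List.mem_cons.mp hkv with h | h
    · subst h
      have := Int.natCast_nonneg ((rest.takeWhile (· == p)).length)
      simp only []
      omega
    · exact ih kv h

-- ===== count_primes on a sorted list =====

theorem foldl_insert_replicate (p : Int) (f : Int → Int) : ∀ (e : Nat) (D : PySem.Dict Int Int),
    1 ≤ e → (List.replicate e p).foldl (fun d q => d.insert q (f q)) D = D.insert p (f p) := by
  intro e
  induction e with
  | zero => omega
  | succ e ih =>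
    intro D _
    rw [List.replicate_succ, List.foldl_cons]
    rcases Nat.eq_zero_or_pos e with h | h
    · subst h; simp
    · rw [ih _ h, PySem.Dict.insert_insert_self]

theorem insert_cons_head {p q : Int} (hne : q ≠ p) (c v : Int) (L : List (Int × Int)) :
    (PySem.Dict.mk ((p, c) :: L) : PySem.Dict Int Int).insert q v =
      PySem.Dict.mk ((p, c) :: ((PySem.Dict.mk L : PySem.Dict Int Int).insert q v).items) := by
  have hb : (p == q) = false := beq_eq_false_iff_ne.mpr (Ne.symm hne)
  by_cases hcont : (PySem.Dict.mk L : PySem.Dict Int Int).contains q = true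
  · have h1 : (PySem.Dict.mk ((p, c) :: L) : PySem.Dict Int Int).contains q = true := by
      simpa [PySem.Dict.contains, hb] using hcont
    rw [PySem.Dict.insert, if_pos h1, PySem.Dict.insert, if_pos hcont]
    simp only [List.map_cons]
    rw [if_neg (by simp [hb])]
  · have h1 : ¬ (PySem.Dict.mk ((p, c) :: L) : PySem.Dict Int Int).contains q = true := by
      simp only [PySem.Dict.contains, List.any_cons, hb, Bool.false_or]
      simpa [PySem.Dict.contains] using hcont
    rw [PySem.Dict.insert, if_neg h1, PySem.Dict.insert, if_neg hcont]
    simp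

theorem foldl_insert_head (p : Int) (c : Int) (f : Int → Int) :
    ∀ (t : List Int) (D : PySem.Dict Int Int), (∀ q ∈ t, q ≠ p) →
    (t.foldl (fun d q => d.insert q (f q)) (PySem.Dict.mk ((p, c) :: D.items))).items =
      (p, c) :: (t.foldl (fun d q => d.insert q (f q)) D).items := by
  intro t
  induction t with
  | nil => intro D _; rfl
  | cons q t' ih =>
    intro D hq
    rw [List.foldl_cons, List.foldl_cons, insert_cons_head (hq q (by simp)) c (f q) D.items]
    exact ih _ (fun y hy => hq y (by simp [hy]))

theorem foldl_insert_head' (p : Int) (c : Int) (f : Int → Int)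
    (t : List Int) (ht : ∀ q ∈ t, q ≠ p) :
    (t.foldl (fun d q => d.insert q (f q)) (PySem.Dict.mk [(p, c)])).items =
      (p, c) :: (t.foldl (fun d q => d.insert q (f q)) PySem.Dict.empty).items := by
  simpa using foldl_insert_head p c f t PySem.Dict.empty ht

theorem ne_of_mem_dropWhile_sorted (p : Int) : ∀ (l : List Int), l.Pairwise (· ≤ ·) →
    (∀ y ∈ l, p ≤ y) → ∀ y ∈ l.dropWhile (· == p), y ≠ p := by
  intro l
  induction l with
  | nil => simp
  | cons a l' ih =>
    intro hs hge y hy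
    by_cases ha : (a == p) = true
    · rw [List.dropWhile_cons, if_pos ha] at hy
      exact ih (List.pairwise_cons.mp hs).2 (fun z hz => hge z (by simp [hz])) y hy
    · rw [List.dropWhile_cons, if_neg ha] at hy
      have hap : a ≠ p := by simpa using ha
      have hpa : p < a := lt_of_le_of_ne (hge a (by simp)) (Ne.symm hap)
      rcases List.mem_cons.mp hy with rfl | hy'
      · omega
      · have := (List.pairwise_cons.mp hs).1 y hy'
        omega

theorem cp_items : ∀ (l : List Int), l.Pairwise (· ≤ ·) →
    (count_primes l).items = runsOf l := by
  intro l
  induction l using runsOf.induct with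
  | case1 => intro _; rw [runsOf]; rfl
  | case2 p rest ih =>
    intro hs
    have hgep : ∀ y ∈ rest, p ≤ y := (List.pairwise_cons.mp hs).1
    have htne : ∀ y ∈ rest.dropWhile (· == p), y ≠ p :=
      ne_of_mem_dropWhile_sorted p rest (List.pairwise_cons.mp hs).2 hgep
    have hts : (rest.dropWhile (· == p)).Pairwise (· ≤ ·) :=
      (List.pairwise_cons.mp hs).2.sublist (List.dropWhile_sublist _)
    have htwr : rest.takeWhile (· == p) =
        List.replicate (rest.takeWhile (· == p)).length p := by
      apply List.eq_replicate_of_mem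
      intro b hb
      simpa using List.mem_takeWhile_imp hb
    have hdecomp : p :: rest =
        List.replicate ((rest.takeWhile (· == p)).length + 1) p ++ rest.dropWhile (· == p) := by
      rw [List.replicate_succ, List.cons_append]
      nth_rewrite 1 [← List.takeWhile_append_dropWhile (p := (· == p)) (l := rest)]
      rw [← htwr]
    have hcount0 : (rest.dropWhile (· == p)).count p = 0 :=
      List.count_eq_zero.mpr (fun h => htne p h rfl)
    have hcp : (p :: rest).count p = (rest.takeWhile (· == p)).length + 1 := by
      rw [hdecomp, List.count_append, List.count_replicate, hcount0]
      simp
    have hcq : ∀ q ∈ rest.dropWhile (· == p), (p :: rest).count q =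
        (rest.dropWhile (· == p)).count q := by
      intro q hq
      rw [hdecomp, List.count_append, List.count_replicate,
        if_neg (by intro h; exact htne q hq (eq_of_beq h).symm)]
      simp
    rw [count_primes, hdecomp, List.foldl_append,
      foldl_insert_replicate p _ _ _ (by omega)]
    have hemp : (PySem.Dict.empty : PySem.Dict Int Int).insert p
        (((List.replicate ((rest.takeWhile (· == p)).length + 1) p ++
          rest.dropWhile (· == p)).count p : Nat) : Int) =
        PySem.Dict.mk [(p, (((rest.takeWhile (· == p)).length + 1 : Nat) : Int))] := by
      rw [← hdecomp, hcp]
      rfl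
    rw [hemp]
    have hhead := foldl_insert_head' p (((rest.takeWhile (· == p)).length + 1 : Nat) : Int)
      (fun q => (((List.replicate ((rest.takeWhile (· == p)).length + 1) p ++
        rest.dropWhile (· == p)).count q : Nat) : Int))
      (rest.dropWhile (· == p)) htne
    simp only [] at hhead
    rw [hhead]
    have hcong : (rest.dropWhile (· == p)).foldl
        (fun d q => d.insert q (((List.replicate ((rest.takeWhile (· == p)).length + 1) p ++
          rest.dropWhile (· == p)).count q : Nat) : Int)) PySem.Dict.empty =
        count_primes (rest.dropWhile (· == p)) := by
      rw [count_primes]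
      apply PySem.List.foldl_congr_mem
      intro acc q hq
      rw [← hdecomp, hcq q hq]
    rw [hcong, ih hts, runsOf_replicate_append p _ (by omega) _ htne]

-- ===== B side =====

theorem bStrip_spec (d : Int) (hd : 2 ≤ d) : ∀ (x c : Int) (all : List Int),
    1 ≤ x → (∀ k : Int, 2 ≤ k → k < d → ¬ k ∣ x) →
    ∃ (e : Nat) (x' : Int),
      bStrip x d c all = (x', c + (e : Int), all ++ List.replicate e d) ∧
      1 ≤ x' ∧ ¬ d ∣ x' ∧ (∀ k : Int, 2 ≤ k → k < d → ¬ k ∣ x') ∧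
      pfI x.toNat = List.replicate e d ++ pfI x'.toNat ∧ (d ∣ x → 1 ≤ e) := by
  intro x c all
  induction x, c, all using bStrip.induct d with
  | case1 x c all h ih =>
    intro hx inv
    obtain ⟨hd2, hx0, hmod⟩ := h
    have hdvd : d ∣ x := (PySem.Int.mod_eq_zero_iff_dvd _ _).mp hmod
    obtain ⟨w, hw⟩ := hdvd
    have hw1 : 1 ≤ w := by nlinarith
    have hfd : PySem.Int.floordiv x d = w := by
      rw [PySem.Int.floordiv_eq_ediv_of_pos (by omega), hw,
        Int.mul_ediv_cancel_left _ (by omega)]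
    rw [hfd] at ih
    have hwdx : w ∣ x := ⟨d, by rw [hw]; ring⟩
    have hinv' : ∀ k : Int, 2 ≤ k → k < d → ¬ k ∣ w :=
      fun k hk2 hkd hkw => inv k hk2 hkd (hkw.trans hwdx)
    obtain ⟨e, x', heq, hx'1, hndvd, hinv2, hpf, _⟩ := ih hw1 hinv'
    have hx2 : 2 ≤ x := by nlinarith
    have hq : x.toNat.minFac = d.toNat := by
      refine minFac_eq_of (by omega) ((int_dvd_iff (by omega) (by omega)).mp ⟨w, hw⟩)
        (by omega) ?_
      intro k hk2 hkd hkx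
      refine inv (k : Int) (by exact_mod_cast hk2) (by omega) ?_
      rw [int_dvd_iff (by omega) (by omega)]
      simpa using hkx
    have hdivNat : x.toNat / d.toNat = w.toNat := by
      have hmn : x.toNat = d.toNat * w.toNat := by
        have h2 : ((d.toNat * w.toNat : Nat) : Int) = x := by
          push_cast
          rw [Int.toNat_of_nonneg (by omega : (0:Int) ≤ d),
              Int.toNat_of_nonneg (by omega : (0:Int) ≤ w)]
          omega
        omega
      rw [hmn, Nat.mul_div_cancel_left _ (by omega)]
    have hpfx : pfI x.toNat = d :: pfI w.toNat := by
      unfold pfI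
      rw [pf_cons (by omega : 2 ≤ x.toNat), hq, hdivNat, List.map_cons]
      congr 1
      simp
      omega
    refine ⟨e + 1, x', ?_, hx'1, hndvd, hinv2, ?_, fun _ => by omega⟩
    · rw [bStrip, if_pos ⟨hd2, hx0, hmod⟩, hfd, heq]
      refine Prod.ext rfl (Prod.ext ?_ ?_)
      · simp only []
        push_cast
        ring
      · simp [List.replicate_succ]
    · rw [hpfx, hpf, List.replicate_succ, List.cons_append]
  | case2 x c all h =>
    intro hx inv
    have hmod : PySem.Int.mod x d ≠ 0 := fun hm => h ⟨hd, by omega, hm⟩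
    have hnd : ¬ d ∣ x := fun hdv => hmod ((PySem.Int.mod_eq_zero_iff_dvd _ _).mpr hdv)
    refine ⟨0, x, ?_, hx, hnd, inv, by simp, fun hdv => absurd hdv hnd⟩
    rw [bStrip, if_neg h]
    simp

theorem bFactorLoop_spec : ∀ (x d : Int) (all : List Int) (maxd : PySem.Dict Int Int),
    2 ≤ d → 1 ≤ x → (∀ k : Int, 2 ≤ k → k < d → ¬ k ∣ x) →
    bFactorLoop x d all maxd =
      (all ++ pfI x.toNat, (runsOf (pfI x.toNat)).foldl mergeStep maxd) := by
  intro x d all maxd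
  induction x, d, all, maxd using bFactorLoop.induct with
  | case1 x d all maxd hc hm r maxd' ih =>
    intro hd hx inv
    have hdvd : d ∣ x := (PySem.Int.mod_eq_zero_iff_dvd _ _).mp hm
    obtain ⟨e, x', heq, hx'1, hndvd, hinv2, hpf, he1⟩ := bStrip_spec d hd x 0 all hx inv
    have he : 1 ≤ e := he1 hdvd
    have hmax : maxd' = if maxd.getD d 0 < r.2.1 then maxd.insert d r.2.1 else maxd := rfl
    have hr : r = (x', 0 + (e : Int), all ++ List.replicate e d) := heq
    clear_value maxd' r
    subst hr
    simp only [zero_add] at ih hmax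
    have hih := ih hd hx'1 hinv2
    rw [bFactorLoop, dif_pos hc, dif_pos hm]
    simp only [heq, zero_add]
    rw [← hmax, hih]
    have htne : ∀ y ∈ pfI x'.toNat, y ≠ d := by
      intro y hy hyd
      obtain ⟨h2y, _, hydvd⟩ := mem_pfI hy
      rw [Int.toNat_of_nonneg (by omega : (0:Int) ≤ x')] at hydvd
      exact hndvd (hyd ▸ hydvd)
    rw [hpf, runsOf_replicate_append d e he _ htne, List.foldl_cons]
    simp [mergeStep, hmax, List.append_assoc]
  | case2 x d all maxd hc hm ih =>
    intro hd hx inv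
    rw [bFactorLoop, dif_pos hc, dif_neg hm]
    refine ih (by omega) hx ?_
    intro k hk2 hkd
    rcases eq_or_lt_of_le (show k ≤ d by omega) with rfl | hlt
    · exact fun hdv => hm ((PySem.Int.mod_eq_zero_iff_dvd _ _).mpr hdv)
    · exact inv k hk2 hlt
  | case3 x d all maxd hc h1x =>
    intro hd hx inv
    rw [bFactorLoop, dif_neg hc, if_pos h1x]
    have hdd : x < d * d := by
      have h2 : ¬ d * d ≤ x := fun hh => hc ⟨hd, hh⟩
      omega
    have hxp : x.toNat.Prime := by
      refine natPrime_of_no_small (by omega) ?_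
      intro k hk2 hkk hdvdk
      have hkx : ((k : Int)) * k ≤ x := by
        have h3 : ((k * k : Nat) : Int) ≤ ((x.toNat : Nat) : Int) := by exact_mod_cast hkk
        push_cast at h3
        omega
      by_cases hkd : (k : Int) < d
      · refine inv (k : Int) (by exact_mod_cast hk2) hkd ?_
        rw [int_dvd_iff (by omega) (by omega)]
        simpa using hdvdk
      · nlinarith
    have hpfx : pfI x.toNat = [x] := by
      simp [pfI, Nat.primeFactorsList_prime hxp]
      omega
    rw [hpfx, runsOf]
    simp [mergeStep, runsOf]
  | case4 x d all maxd hc h1x =>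
    intro hd hx inv
    have hx1 : x = 1 := by omega
    subst hx1
    rw [bFactorLoop, dif_neg hc, if_neg (by omega)]
    simp [pfI, runsOf]

-- ===== assembling =====

theorem mergeStepA_eq (d : PySem.Dict Int Int) (kv : Int × Int) (h : 1 ≤ kv.2) :
    mergeStepA d kv = mergeStep d kv := by
  unfold mergeStepA mergeStep PySem.Dict.getD
  cases hg : d.get? kv.1 with
  | none => simp [show (0:Int) < kv.2 by omega]
  | some v =>
    by_cases hv : v = 0
    · subst hv; simp [show (0:Int) < kv.2 by omega]
    · simp [hv]

-- ===== VERDICT (by name: the statement is the Claim_ definition above) =====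
theorem count_all_factors_spec : Claim_equal_count_all_factors := by
  intro num_limit _
  unfold Spec_count_all_factors count_all_factors count_all_factors_alt
  have hbody : ∀ (st : List Int × PySem.Dict Int Int) (i : Int),
      i ∈ PySem.List.pyRange 2 (num_limit + 1) 1 →
      (st.1 ++ get_factors i, (count_primes (get_factors i)).items.foldl mergeStepA st.2) =
        bFactorLoop i 2 st.1 st.2 := by
    intro st i hi
    have h2 : 2 ≤ i := ((PySem.List.mem_pyRange_one).mp hi).1
    rw [get_factors_eq h2, cp_items _ (pfI_sorted _),
      bFactorLoop_spec i 2 st.1 st.2 le_rfl (by omega) (by intro k hk hk2 _; omega)]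
    refine Prod.ext rfl ?_
    exact PySem.List.foldl_congr_mem _ _ _ _
      (fun acc kv hkv => mergeStepA_eq acc kv (runsOf_pos _ kv hkv))
  rw [PySem.List.foldl_congr_mem _ _ _ _ (fun st i hi => hbody st i hi)]
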